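-- pv_equiv track=rewrite | github.com/HaneulKim214/Casino | util.py | create_wheel
-- ===== SOURCE A (Python) =====
-- def append_side_bets(lst, i):
--     """
--     Add all side bets to appropriate numbers
--
--     Parameters
--     ----------
--     lst : list
--           list of bets a number has so far
--     i : int
--         current number
--     """
--     if i <= 13:
--         lst.append("first_12")
--     elif 13 <= i <= 24:
--         lst.append("second_12")
--     else:
--         lst.append("third_12")
--     if i <= 18:
--         lst.append("1to18")
--     else:
--         lst.append("19to36")
--     return lst
--
-- def add_2to1(lst, i):
--     if i in list(range(1, 35, 3)):
--         lst.append("left_2to1")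
--     elif i in list(range(2, 36, 3)):
--         lst.append("mid_2to1")
--     else:
--         lst.append("right_2to1")
--     return lst
--
-- def create_wheel(type):
--     wheel = {}
--     for i in range(37):
--         lst = []
--         if i == 0:
--             if type == "us":
--                 lst.append("green")
--                 wheel[i] = lst
--             lst.append("green")
--             wheel[i] = lst
--             continue
--         elif i % 2 == 0:
--             lst.append("red")
--             lst.append("even")
--             lst = append_side_bets(lst, i)
--             lst = add_2to1(lst, i)
--         else:
--             lst.append("black")
--             lst.append("odd")
--             lst = append_side_bets(lst, i)
--             lst = add_2to1(lst, i)
--         wheel[i] = lst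
--     return wheel
-- ===== SOURCE B (Python) =====
-- def create_wheel(type):
--     # category-major construction: start with 37 empty slots, then one pass per bet type
--     wheel = {i: [] for i in range(37)}
--     wheel[0].append("green")
--     if type == "us":
--         wheel[0].append("green")
--     for i in range(1, 37):  # color
--         wheel[i].append("red" if i % 2 == 0 else "black")
--     for i in range(1, 37):  # parity
--         wheel[i].append("even" if i % 2 == 0 else "odd")
--     for i in range(1, 37):  # dozen
--         wheel[i].append("first_12" if i <= 13 else ("second_12" if i <= 24 else "third_12"))
--     for i in range(1, 37):  # half
--         wheel[i].append("1to18" if i <= 18 else "19to36")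
--     for i in range(1, 37):  # column
--         wheel[i].append("left_2to1" if i % 3 == 1 else ("mid_2to1" if i % 3 == 2 else "right_2to1"))
--     return wheel
-- ===== Notes on version B (the rewrite author's own statement) =====
-- stated objective: alternative
-- what changed: B builds the wheel category-major: 37 empty slots first, then one separate pass per bet type (color, parity, dozen, half, column) appending to each number's list, instead of A's number-major loop that assembles each number's full list via two helper functions.
import Mathlib
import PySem

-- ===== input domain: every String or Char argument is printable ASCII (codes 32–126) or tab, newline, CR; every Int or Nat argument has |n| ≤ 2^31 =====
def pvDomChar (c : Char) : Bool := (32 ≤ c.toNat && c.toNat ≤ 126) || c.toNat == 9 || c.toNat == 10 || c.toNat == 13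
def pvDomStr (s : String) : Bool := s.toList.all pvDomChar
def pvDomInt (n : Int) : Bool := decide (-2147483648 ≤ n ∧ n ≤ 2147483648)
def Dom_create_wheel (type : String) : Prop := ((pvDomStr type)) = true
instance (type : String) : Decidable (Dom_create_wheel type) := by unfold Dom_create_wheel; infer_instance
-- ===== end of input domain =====

-- B builds the wheel category-major (one append pass per bet type over empty slots)
-- instead of A's number-major loop with two helper functions; same return value, no speed claim.

-- ===== PORT A =====
def append_side_bets (lst : List String) (i : Int) : List String :=
  let lst :=
    if i ≤ 13 then lst ++ ["first_12"]
    else if 13 ≤ i ∧ i ≤ 24 then lst ++ ["second_12"]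
    else lst ++ ["third_12"]
  if i ≤ 18 then lst ++ ["1to18"] else lst ++ ["19to36"]

def add_2to1 (lst : List String) (i : Int) : List String :=
  if (PySem.List.pyRange 1 35 3).contains i then lst ++ ["left_2to1"]
  else if (PySem.List.pyRange 2 36 3).contains i then lst ++ ["mid_2to1"]
  else lst ++ ["right_2to1"]

def create_wheel (type : String) : List (Int × List String) :=
  let wheel : PySem.Dict Int (List String) :=
    (PySem.List.pyRange 0 37 1).foldl (fun wheel i =>
      if i == 0 then
        let lst : List String := []
        if type == "us" then
          let lst := lst ++ ["green"]
          let wheel := wheel.insert i lst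
          let lst := lst ++ ["green"]
          wheel.insert i lst
        else
          let lst := lst ++ ["green"]
          wheel.insert i lst
      else if PySem.Int.mod i 2 == 0 then
        let lst : List String := []
        let lst := lst ++ ["red"]
        let lst := lst ++ ["even"]
        let lst := append_side_bets lst i
        let lst := add_2to1 lst i
        wheel.insert i lst
      else
        let lst : List String := []
        let lst := lst ++ ["black"]
        let lst := lst ++ ["odd"]
        let lst := append_side_bets lst i
        let lst := add_2to1 lst i
        wheel.insert i lst) PySem.Dict.empty
  wheel.items

-- ===== PORT B =====
def create_wheel_alt (type : String) : List (Int × List String) :=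
  let wheel : PySem.Dict Int (List String) :=
    (PySem.List.pyRange 0 37 1).foldl (fun w i => w.insert i ([] : List String)) PySem.Dict.empty
  let wheel := wheel.modify 0 [] (· ++ ["green"])
  let wheel := if type == "us" then wheel.modify 0 [] (· ++ ["green"]) else wheel
  let wheel := (PySem.List.pyRange 1 37 1).foldl (fun w i =>
    w.modify i [] (· ++ [if PySem.Int.mod i 2 == 0 then "red" else "black"])) wheel
  let wheel := (PySem.List.pyRange 1 37 1).foldl (fun w i =>
    w.modify i [] (· ++ [if PySem.Int.mod i 2 == 0 then "even" else "odd"])) wheel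
  let wheel := (PySem.List.pyRange 1 37 1).foldl (fun w i =>
    w.modify i [] (· ++ [if i ≤ 13 then "first_12" else if i ≤ 24 then "second_12" else "third_12"])) wheel
  let wheel := (PySem.List.pyRange 1 37 1).foldl (fun w i =>
    w.modify i [] (· ++ [if i ≤ 18 then "1to18" else "19to36"])) wheel
  let wheel := (PySem.List.pyRange 1 37 1).foldl (fun w i =>
    w.modify i [] (· ++ [if PySem.Int.mod i 3 == 1 then "left_2to1" else if PySem.Int.mod i 3 == 2 then "mid_2to1" else "right_2to1"])) wheel
  wheel.items

-- ===== PRECONDITION & SPEC =====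
def Spec_create_wheel (type : String) (out : List (Int × List String)) : Prop := out = create_wheel_alt type
instance (type : String) (out : List (Int × List String)) : Decidable (Spec_create_wheel type out) := by unfold Spec_create_wheel; infer_instance

-- ===== CLAIM (what is proved, stated in full; the proofs are below) =====
def Claim_equal_create_wheel : Prop := ∀ (type : String), Dom_create_wheel type → Spec_create_wheel type (create_wheel type)

-- ===== LEMMAS AND PROOFS =====

-- Both ports depend on `type` only through the Boolean test `type == "us"`.
set_option maxRecDepth 4096 in
theorem create_wheel_eq_of_beq (type : String) :
    create_wheel type = create_wheel_alt type := by
  cases hb : (type == "us") <;>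
    simp only [create_wheel, create_wheel_alt, hb] <;> decide

-- ===== VERDICT (by name: the statement is the Claim_ definition above) =====
theorem create_wheel_spec : Claim_equal_create_wheel := by
  intro type _
  exact create_wheel_eq_of_beq type
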